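-- pv_equiv track=rewrite | github.com/rappdw/redblackgraph | redblackgraph/reference/generation.py | get_traversal_path
-- ===== SOURCE A (Python) =====
-- from typing import Sequence
--
-- def get_traversal_path(pedigree_number: int) -> Sequence[str]:
--     '''Given a pedigree_number, representing a relationship from a "root" vertex to an
--     "ancester" vertex, return the traversal path of edges to red or black vertices
--     to "walk" from the "root" to the "ancesster".
--
--     For example, input of 14 results in ['b', 'b', 'r'] which indicates that starting at
--     the "root" vertex, follow the edge to the black vertex, then the edge to the black
--     vertex then the edge to the red vertex.'''
--     x = pedigree_number
--     path = []
--     mask = 1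
--     while (x > 1):
--         path.insert(0, 'b' if x & mask else 'r')
--         x >>= 1
--     return path
-- ===== SOURCE B (Python) =====
-- def get_traversal_path(pedigree_number: int):
--     if pedigree_number <= 1:
--         return []
--     return ['b' if c == '1' else 'r' for c in format(pedigree_number, 'b')[1:]]
-- ===== Notes on version B (the rewrite author's own statement) =====
-- stated objective: idiomatic
-- what changed: B formats the number as a binary string and maps its digits after the leading bit MSB-first, replacing A's LSB-first shift loop with repeated insert(0,...) front insertions.
import Mathlib
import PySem

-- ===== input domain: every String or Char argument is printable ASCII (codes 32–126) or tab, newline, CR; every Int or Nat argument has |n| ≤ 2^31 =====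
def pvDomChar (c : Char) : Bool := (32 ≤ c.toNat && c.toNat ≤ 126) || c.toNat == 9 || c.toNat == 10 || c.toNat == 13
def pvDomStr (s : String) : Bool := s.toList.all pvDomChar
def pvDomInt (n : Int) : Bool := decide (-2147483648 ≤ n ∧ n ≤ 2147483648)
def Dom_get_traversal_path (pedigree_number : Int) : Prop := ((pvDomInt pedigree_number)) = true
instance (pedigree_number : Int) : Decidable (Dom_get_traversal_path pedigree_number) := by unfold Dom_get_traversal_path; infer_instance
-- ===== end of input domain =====

-- B replaces A's LSB-first shift loop with front insertions by an MSB-first map over the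
-- binary-digit string after the leading bit (objective: idiomatic).

-- ===== PORT A =====
-- while (x > 1): path.insert(0, 'b' if x & mask else 'r'); x >>= 1   (mask = 1;
-- x >> 1 is Python's floor shift = PySem.Int.floordiv x 2, x & 1 = PySem.Int.band x 1 — exact)
def gtpLoopA (x : Int) (path : List String) : List String :=
  if _h : x > 1 then
    gtpLoopA (PySem.Int.floordiv x 2)
      ((if PySem.Int.band x 1 ≠ 0 then "b" else "r") :: path)
  else path
termination_by x.toNat
decreasing_by
  have h2 : PySem.Int.floordiv x 2 = x / 2 := PySem.Int.floordiv_eq_ediv_of_pos (by omega)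
  rw [h2]; omega

def get_traversal_path (pedigree_number : Int) : List String :=
  gtpLoopA pedigree_number []

-- ===== PORT B =====
-- binChars n = the characters of format(n, 'b') for n ≥ 1 (MSB first); ported by hand, exact for n ≥ 1
def binChars : Nat → List Char
  | 0 => []
  | n+1 => binChars ((n+1)/2) ++ [if (n+1) % 2 = 1 then '1' else '0']

def get_traversal_path_alt (pedigree_number : Int) : List String :=
  if pedigree_number ≤ 1 then []
  else ((binChars pedigree_number.toNat).drop 1).map (fun c => if c = '1' then "b" else "r")

-- ===== PRECONDITION & SPEC =====
def Spec_get_traversal_path (pedigree_number : Int) (out : List String) : Prop := out = get_traversal_path_alt pedigree_number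
instance (pedigree_number : Int) (out : List String) : Decidable (Spec_get_traversal_path pedigree_number out) := by unfold Spec_get_traversal_path; infer_instance

-- ===== CLAIM (what is proved, stated in full; the proofs are below) =====
def Claim_equal_get_traversal_path : Prop := ∀ (pedigree_number : Int), Dom_get_traversal_path pedigree_number → Spec_get_traversal_path pedigree_number (get_traversal_path pedigree_number)

-- ===== LEMMAS AND PROOFS =====

theorem binChars_succ (n : Nat) :
    binChars (n+1) = binChars ((n+1)/2) ++ [if (n+1) % 2 = 1 then '1' else '0'] := by
  rw [binChars]

theorem binChars_ne_nil (n : Nat) (h : 1 ≤ n) : binChars n ≠ [] := by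
  match n, h with
  | n+1, _ => simp [binChars]

theorem gtpLoopA_eq (n : Nat) (h : 1 ≤ n) :
    ∀ path, gtpLoopA (n : Int) path =
      ((binChars n).drop 1).map (fun c => if c = '1' then "b" else "r") ++ path := by
  induction n using Nat.strong_induction_on with
  | _ n ih =>
    intro path
    by_cases h2 : n > 1
    · rw [gtpLoopA]
      have hdiv : PySem.Int.floordiv (n : Int) 2 = ((n / 2 : Nat) : Int) :=
        PySem.Int.floordiv_natCast n 2
      have hband : PySem.Int.band (n : Int) 1 = PySem.Int.mod (n : Int) 2 :=
        PySem.Int.band_one _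
      have hmod : PySem.Int.mod (n : Int) 2 = ((n % 2 : Nat) : Int) :=
        PySem.Int.mod_natCast n 2
      simp only [h2, Nat.one_lt_cast, dite_true, hdiv, hband, hmod]
      rw [ih (n / 2) (by omega) (by omega)]
      obtain ⟨m, rfl⟩ : ∃ m, n = m + 1 := ⟨n - 1, by omega⟩
      rw [binChars_succ, List.drop_append_of_le_length
        (by have := binChars_ne_nil ((m + 1) / 2) (by omega)
            cases hx : binChars ((m + 1) / 2) <;> simp_all)]
      simp only [List.map_append, List.append_assoc]
      congr 2
      by_cases hm : (m + 1) % 2 = 1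
      · simp [hm]
      · have h0 : (m + 1) % 2 = 0 := by omega
        simp [h0]
    · -- n = 1: loop does not run, and drop 1 of the single digit is []
      have hn1 : n = 1 := by omega
      subst hn1
      rw [gtpLoopA]
      simp [binChars]

theorem get_traversal_path_spec_aux (x : Int) :
    get_traversal_path x = get_traversal_path_alt x := by
  unfold get_traversal_path get_traversal_path_alt
  by_cases h : x ≤ 1
  · rw [gtpLoopA]
    simp [h, show ¬ x > 1 by omega]
  · have hx : x = ((x.toNat : Nat) : Int) := by omega
    rw [if_neg h, hx, gtpLoopA_eq x.toNat (by omega), List.append_nil,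
      Int.toNat_natCast]

-- ===== VERDICT (by name: the statement is the Claim_ definition above) =====
theorem get_traversal_path_spec : Claim_equal_get_traversal_path := by
  intro x _
  exact get_traversal_path_spec_aux x
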